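-- pv_equiv track=rewrite | github.com/sajid-sarker/CSE221-Lab | Lab3/task2.py | maxDC
-- ===== SOURCE A (Python) =====
-- def maxDC(arr):
--   #Base case
--   if len(arr) <= 1:
--     return arr[0]   #return value
--
--   mid = len(arr)//2
--   left = arr[:mid]
--   right = arr[mid:]
--
--   #Recursive call for division
--   left = maxDC(left)
--   right = maxDC(right)
--
--   #Comparison
--   maxVal = -1
--
--   if left <= right:
--     maxVal = right
--
--   else:
--     maxVal = left
--
--   return maxVal
-- ===== SOURCE B (Python) =====
-- def maxDC(arr):
--   # Simpler: iterative single-pass maximum seeded from arr[0]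
--   # (raises IndexError on empty input, like A).
--   m = arr[0]
--   for x in arr[1:]:
--     if x > m:
--       m = x
--   return m
-- ===== Notes on version B (the rewrite author's own statement) =====
-- stated objective: simpler
-- what changed: Replaced the recursive divide-and-conquer (split into halves via slicing, recurse, compare) with one flat linear scan keeping a running maximum.
import Mathlib
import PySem

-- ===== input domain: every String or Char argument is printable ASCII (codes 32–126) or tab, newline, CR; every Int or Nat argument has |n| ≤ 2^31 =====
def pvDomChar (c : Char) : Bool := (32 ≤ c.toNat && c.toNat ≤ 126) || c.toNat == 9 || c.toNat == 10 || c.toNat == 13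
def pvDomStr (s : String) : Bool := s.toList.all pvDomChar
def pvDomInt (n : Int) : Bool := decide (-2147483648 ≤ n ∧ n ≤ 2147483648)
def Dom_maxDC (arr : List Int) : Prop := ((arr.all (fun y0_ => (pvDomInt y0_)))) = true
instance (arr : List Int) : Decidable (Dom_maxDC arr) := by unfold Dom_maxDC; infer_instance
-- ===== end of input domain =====

-- B replaces A's recursive halving maximum with one flat linear scan (simpler); both raise on the empty list, excluded by Pre_.


-- ===== PORT A =====
-- arr[:mid] / arr[mid:] with 0 ≤ mid ≤ len are exactly take/drop; arr[0] is pyGet? (none = IndexError, excluded by Pre_).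
def maxDC (arr : List Int) : Int :=
  if h : arr.length ≤ 1 then (PySem.List.pyGet? arr 0).getD 0
  else
    let mid := arr.length / 2
    let left := maxDC (arr.take mid)
    let right := maxDC (arr.drop mid)
    if left ≤ right then right else left
termination_by arr.length
decreasing_by
  · simp [List.length_take]; omega
  · simp [List.length_drop]; omega

-- ===== PORT B =====
-- m = arr[0]; for x in arr[1:]: if x > m: m = x
def maxDC_alt (arr : List Int) : Int :=
  match arr with
  | [] => 0  -- unreachable: Python B raises IndexError here (outside Pre_)
  | x :: xs => xs.foldl (fun m y => if y > m then y else m) x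

-- ===== PRECONDITION & SPEC =====
-- A (and B) raise IndexError on the empty list; Pre_ excludes exactly that.
def Pre_maxDC (arr : List Int) : Prop := arr ≠ []
instance (arr : List Int) : Decidable (Pre_maxDC arr) := by unfold Pre_maxDC; infer_instance
def pvWitness_maxDC : List Int := [3, -1, 7, 7, 2]

def Spec_maxDC (arr : List Int) (out : Int) : Prop := out = maxDC_alt arr
instance (arr : List Int) (out : Int) : Decidable (Spec_maxDC arr out) := by unfold Spec_maxDC; infer_instance

-- ===== CLAIM (what is proved, stated in full; the proofs are below) =====
def Claim_equal_maxDC : Prop := ∀ (arr : List Int), Dom_maxDC arr → Pre_maxDC arr → Spec_maxDC arr (maxDC arr)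

-- ===== LEMMAS AND PROOFS =====

-- B's update step is max
lemma alt_step_eq_max : (fun (m y : Int) => if y > m then y else m) = max := by
  funext m y
  simp [max_def]
  omega

lemma alt_cons (x : Int) (xs : List Int) :
    maxDC_alt (x :: xs) = xs.foldl max x := by
  simp [maxDC_alt, alt_step_eq_max]

lemma foldl_max_shift (a y : Int) (ys : List Int) :
    ys.foldl max (max a y) = max a (ys.foldl max y) := by
  induction ys generalizing y with
  | nil => simp
  | cons z zs ih => simp only [List.foldl_cons, max_assoc, ih]

-- B over an append of two nonempty lists combines like A's comparison step
lemma alt_append (l₁ l₂ : List Int) (h₁ : l₁ ≠ []) (h₂ : l₂ ≠ []) :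
    maxDC_alt (l₁ ++ l₂) = max (maxDC_alt l₁) (maxDC_alt l₂) := by
  obtain ⟨x, xs, rfl⟩ := List.exists_cons_of_ne_nil h₁
  obtain ⟨y, ys, rfl⟩ := List.exists_cons_of_ne_nil h₂
  have hsh : x :: xs ++ y :: ys = x :: (xs ++ y :: ys) := rfl
  rw [hsh, alt_cons, alt_cons, alt_cons, List.foldl_append, List.foldl_cons]
  exact foldl_max_shift _ _ _

lemma maxDC_eq_alt_len : ∀ (n : ℕ) (arr : List Int), arr.length = n → arr ≠ [] →
    maxDC arr = maxDC_alt arr := by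
  intro n
  induction n using Nat.strong_induction_on with
  | _ n ih =>
    intro arr hlen hne
    by_cases h : arr.length ≤ 1
    · obtain ⟨x, xs, rfl⟩ := List.exists_cons_of_ne_nil hne
      have hxs : xs = [] := by
        cases xs with
        | nil => rfl
        | cons _ _ => simp at h
      subst hxs
      rw [maxDC]
      simp [maxDC_alt, PySem.List.pyGet?, PySem.List.pyIdx?]
    · have hlen2 : 2 ≤ arr.length := by omega
      have h1 : 1 ≤ arr.length / 2 ∧ arr.length / 2 < arr.length := by omega
      have htl : (arr.take (arr.length / 2)).length = arr.length / 2 := by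
        simp [List.length_take]; omega
      have hdl : (arr.drop (arr.length / 2)).length = arr.length - arr.length / 2 := by
        simp [List.length_drop]
      have htk : arr.take (arr.length / 2) ≠ [] := by
        intro hc; rw [hc] at htl; simp at htl; omega
      have hdr : arr.drop (arr.length / 2) ≠ [] := by
        intro hc; rw [hc] at hdl; simp at hdl; omega
      rw [maxDC]
      simp only [dif_neg h]
      rw [ih (arr.take (arr.length / 2)).length (by omega) _ rfl htk,
          ih (arr.drop (arr.length / 2)).length (by omega) _ rfl hdr]
      have harr : arr = arr.take (arr.length / 2) ++ arr.drop (arr.length / 2) :=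
        (List.take_append_drop _ _).symm
      conv_rhs => rw [harr]
      rw [alt_append _ _ htk hdr, max_def]

-- ===== VERDICT (by name: the statement is the Claim_ definition above) =====
theorem maxDC_spec : Claim_equal_maxDC := by
  intro arr _ hpre
  unfold Spec_maxDC
  exact maxDC_eq_alt_len arr.length arr rfl hpre
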